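-- pv_equiv track=rewrite | github.com/rafaelsiq/Gerar-CPF | gerarCPF.py | substituirCPF
-- ===== SOURCE A (Python) =====
-- def substituirCPF(cpf):
--     contador=int(0)
--     if cpf.find("x".upper()) != -1:
--         CPFgera = []
--         CPF_temp = []
--         for i in range(10):
--             CPFgera.append(cpf)
--         for i in CPFgera:
--             CPF_temp.append(i.replace("X",str(contador),1))
--             contador+=1
--         contador =0
--         teste = []
--         CPFgera = CPF_temp
--         for i in CPFgera:
--             if i.find("X") > -1:
--                 teste = substituirCPF(i)
--                 for i in teste:
--                     CPFgera.append(i)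
--         teste = []
--         CPF_temp = []
--         for i in CPFgera:
--             if i.find("X") == -1:
--                 CPF_temp.append(i)
--         CPFgera = CPF_temp
--         return CPFgera
-- ===== SOURCE B (Python) =====
-- def substituirCPF(cpf):
--     if "X" not in cpf:
--         return None
--     results = [""]
--     for ch in cpf:
--         if ch == "X":
--             results = [r + d for r in results for d in "0123456789"]
--         else:
--             results = [r + ch for r in results]
--     return results
-- ===== Notes on version B (the rewrite author's own statement) =====
-- stated objective: simpler
-- what changed: A's recursive replace-one-X-at-a-time expansion (a list grown while being iterated, then filtered) is replaced by a single left-to-right pass over the template that extends every partial result by the next character (a fold over [""]).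
-- outside the precondition, e.g. on substituirCPF('12345'): A returns None, B returns None
import Mathlib
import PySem

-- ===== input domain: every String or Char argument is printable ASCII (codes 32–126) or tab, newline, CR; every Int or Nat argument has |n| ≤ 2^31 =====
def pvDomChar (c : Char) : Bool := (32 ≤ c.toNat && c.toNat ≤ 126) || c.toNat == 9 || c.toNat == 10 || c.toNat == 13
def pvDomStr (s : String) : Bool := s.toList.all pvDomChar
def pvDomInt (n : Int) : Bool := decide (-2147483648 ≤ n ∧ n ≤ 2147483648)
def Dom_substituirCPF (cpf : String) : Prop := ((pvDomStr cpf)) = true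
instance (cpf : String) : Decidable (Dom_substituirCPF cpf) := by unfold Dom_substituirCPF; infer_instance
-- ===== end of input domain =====

set_option maxRecDepth 8192

-- B replaces A's recursive replace-one-X-at-a-time tree expansion (grow-while-iterating list,
-- final filter) with a single left-to-right pass over the template that extends every partial
-- result by the next character (objective: simpler). On strings with no "X" both Pythons
-- return None (not a list); Pre_ excludes them.

-- ===== PORT A =====
-- s.replace("X", new, 1): replace the FIRST occurrence only; exact for the one-char pattern
-- "X" (PySem.Str.replace has no count argument, so this is ported by hand, step for step)
def pvReplaceFirstX (cs : List Char) (d : List Char) : List Char :=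
  match cs with
  | [] => []
  | c :: rest => if c = 'X' then d ++ rest else c :: pvReplaceFirstX rest d

-- termination helper for A's port: replacing the first 'X' by an 'X'-free string drops the count
theorem pvReplaceFirstX_count (cs d : List Char) (hcs : 'X' ∈ cs) (hd : 'X' ∉ d) :
    (pvReplaceFirstX cs d).count 'X' + 1 = cs.count 'X' := by
  induction cs with
  | nil => cases hcs
  | cons c rest ih =>
    by_cases hc : c = 'X'
    · subst hc
      simp [pvReplaceFirstX, List.count_append, List.count_eq_zero_of_not_mem hd]
    · have hmem : 'X' ∈ rest := by
        rcases List.mem_cons.mp hcs with h | h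
        · exact absurd h.symm hc
        · exact h
      have := ih hmem
      simp only [pvReplaceFirstX, if_neg hc, List.count_cons]
      omega

-- A's recursion, on the character list (A's strings go through toList / String.ofList)
def substituirCPFCore (cs : List Char) : List (List Char) :=
  if PySem.Chars.find cs ['X'] ≠ -1 then
    -- for i in range(10): CPFgera.append(cpf)
    let CPFgera : List (List Char) := (PySem.List.pyRange 0 10 1).map (fun _ => cs)
    -- for i in CPFgera: CPF_temp.append(i.replace("X", str(contador), 1)); contador += 1
    let CPF_temp : List (List Char) :=
      (PySem.List.enumerate CPFgera).map (fun p => pvReplaceFirstX p.2 (PySem.Int.toChars p.1))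
    -- the scan over the growing CPFgera: each item still holding an "X" contributes its
    -- recursive expansion, appended at the end; the appended items are re-scanned by Python
    -- but are outputs of the recursion and hold no "X", so that re-scan appends nothing
    let appended : List (List Char) :=
      CPF_temp.attach.flatMap (fun i =>
        if PySem.Chars.find i.1 ['X'] > -1 then substituirCPFCore i.1 else [])
    -- final loop: keep the items with no "X"
    (CPF_temp ++ appended).filter (fun i => PySem.Chars.find i ['X'] == -1)
  else []  -- Python A falls through and returns None here; excluded by Pre_
termination_by cs.count 'X'
decreasing_by
  rename_i hfind hXi
  obtain ⟨i, hi⟩ := i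
  have hX : 'X' ∈ cs := by
    have := (PySem.Chars.find_ne_neg_one_iff (s := cs) (sub := ['X'])).mp hfind
    exact (List.singleton_infix_iff _ _).mp this
  simp only [CPF_temp, CPFgera, List.mem_map, PySem.List.mem_enumerate_iff, List.length_map] at hi
  obtain ⟨p, ⟨k, hk, hp⟩, hrep⟩ := hi
  subst hp
  have hk10 : k < 10 := by simpa using hk
  simp only [List.getElem_map] at hrep
  have hd : 'X' ∉ PySem.Int.toChars ((0 : Int) + k) := by
    interval_cases k <;> decide
  have := pvReplaceFirstX_count cs (PySem.Int.toChars ((0 : Int) + k)) hX hd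
  have hcnt : List.count 'X' i + 1 = List.count 'X' cs := by rw [← hrep]; exact this
  show List.count 'X' i < List.count 'X' cs
  omega

def substituirCPF (cpf : String) : List String :=
  (substituirCPFCore cpf.toList).map String.ofList

-- ===== PORT B =====
def substituirCPF_alt (cpf : String) : List String :=
  if PySem.Str.isIn "X" cpf then
    -- results = [""]; one pass over cpf, extending every partial result by the next character
    -- (Python's growing strings held as List Char; String.ofList at the end)
    (cpf.toList.foldl
      (fun results ch =>
        if ch = 'X' then
          results.flatMap (fun r => "0123456789".toList.map (fun d => r ++ [d]))
        else
          results.map (fun r => r ++ [ch]))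
      [([] : List Char)]).map String.ofList
  else []  -- Python B returns None here; excluded by Pre_

-- ===== PRECONDITION & SPEC =====
-- Pre_ excludes strings containing no "X": there both Pythons return None, which is not a
-- value of the declared list-of-strings type (both ports return [] there all the same).
def Pre_substituirCPF (cpf : String) : Prop := PySem.Str.isIn "X" cpf = true
instance (cpf : String) : Decidable (Pre_substituirCPF cpf) := by
  unfold Pre_substituirCPF; infer_instance

def pvWitness_substituirCPF : String := "04X.2X"

def Spec_substituirCPF (cpf : String) (out : List String) : Prop := out = substituirCPF_alt cpf
instance (cpf : String) (out : List String) : Decidable (Spec_substituirCPF cpf out) := by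
  unfold Spec_substituirCPF; infer_instance

-- ===== CLAIM (what is proved, stated in full; the proofs are below) =====
def Claim_equal_substituirCPF : Prop :=
  ∀ (cpf : String), Dom_substituirCPF cpf → Pre_substituirCPF cpf →
    Spec_substituirCPF cpf (substituirCPF cpf)

-- ===== LEMMAS AND PROOFS =====

-- the common characterisation of both programs: the completions of the template, in output
-- order (leftmost "X" varies slowest)
def pvDigits : List Char := ['0','1','2','3','4','5','6','7','8','9']

def pvGen (cs : List Char) : List (List Char) :=
  match cs with
  | [] => [[]]
  | c :: rest =>
    if c = 'X' then pvDigits.flatMap (fun d => (pvGen rest).map (d :: ·))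
    else (pvGen rest).map (c :: ·)

theorem pvGen_no_X (cs : List Char) (h : 'X' ∉ cs) : pvGen cs = [cs] := by
  induction cs with
  | nil => rfl
  | cons c rest ih =>
    have hc : ¬ c = 'X' := fun hc => h (by simp [hc])
    have hrest : 'X' ∉ rest := fun hr => h (List.mem_cons_of_mem _ hr)
    simp [pvGen, hc, ih hrest]

theorem pvGen_mem_no_X (cs u : List Char) (hu : u ∈ pvGen cs) : 'X' ∉ u := by
  induction cs generalizing u with
  | nil => simp [pvGen] at hu; simp [hu]
  | cons c rest ih =>
    by_cases hc : c = 'X'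
    · subst hc
      simp only [pvGen, if_true, List.mem_flatMap, List.mem_map] at hu
      obtain ⟨d, hd, v, hv, huv⟩ := hu
      have hall : ∀ x ∈ pvDigits, x ≠ 'X' := by simp [pvDigits]
      intro hmem
      rw [← huv] at hmem
      rcases List.mem_cons.mp hmem with h | h
      · exact hall d hd h.symm
      · exact ih v hv h
    · simp only [pvGen, if_neg hc, List.mem_map] at hu
      obtain ⟨v, hv, hvu⟩ := hu
      intro hmem
      rw [← hvu] at hmem
      rcases List.mem_cons.mp hmem with h | h
      · exact hc h.symm
      · exact ih v hv h

theorem pvGen_step (cs : List Char) (h : 'X' ∈ cs) :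
    pvGen cs = pvDigits.flatMap (fun d => pvGen (pvReplaceFirstX cs [d])) := by
  induction cs with
  | nil => cases h
  | cons c rest ih =>
    by_cases hc : c = 'X'
    · subst hc
      simp only [pvGen, if_true, pvReplaceFirstX, List.singleton_append]
      refine List.flatMap_congr (fun d hd => ?_)
      have hall : ∀ x ∈ pvDigits, ¬ x = 'X' := by simp [pvDigits]
      simp [hall d hd]
    · have hrest : 'X' ∈ rest := by
        rcases List.mem_cons.mp h with h | h
        · exact absurd h.symm hc
        · exact h
      simp only [pvGen, if_neg hc, ih hrest]
      rw [List.map_flatMap]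
      refine List.flatMap_congr (fun d _ => ?_)
      simp [pvReplaceFirstX, pvGen, hc]

theorem pvFold_eq (cs : List Char) (acc : List (List Char)) :
    cs.foldl
      (fun results ch =>
        if ch = 'X' then
          results.flatMap (fun r => pvDigits.map (fun d => r ++ [d]))
        else
          results.map (fun r => r ++ [ch])) acc
      = acc.flatMap (fun r => (pvGen cs).map (r ++ ·)) := by
  induction cs generalizing acc with
  | nil => simp [pvGen]
  | cons c rest ih =>
    by_cases hc : c = 'X'
    · subst hc
      rw [List.foldl_cons, if_pos rfl, ih, List.flatMap_assoc]
      simp only [pvGen, if_true]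
      refine List.flatMap_congr (fun r _ => ?_)
      simp only [List.flatMap_map, List.map_flatMap, List.map_map]
      refine List.flatMap_congr (fun d _ => ?_)
      simp [Function.comp_def, List.append_assoc]
    · rw [List.foldl_cons, if_neg hc, ih]
      simp only [pvGen, if_neg hc, List.flatMap_map, List.map_map]
      refine List.flatMap_congr (fun r _ => ?_)
      simp [Function.comp_def, List.append_assoc]

theorem pvTemp_eq (cs : List Char) :
    (PySem.List.enumerate ((PySem.List.pyRange 0 10 1).map (fun _ => cs))).map
        (fun p => pvReplaceFirstX p.2 (PySem.Int.toChars p.1))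
      = pvDigits.map (fun d => pvReplaceFirstX cs [d]) := by
  have h : PySem.List.pyRange 0 10 1 = [0, 1, 2, 3, 4, 5, 6, 7, 8, 9] := by decide
  rw [h]
  have e0 : PySem.Int.toChars 0 = ['0'] := by decide
  have e1 : PySem.Int.toChars 1 = ['1'] := by decide
  have e2 : PySem.Int.toChars 2 = ['2'] := by decide
  have e3 : PySem.Int.toChars 3 = ['3'] := by decide
  have e4 : PySem.Int.toChars 4 = ['4'] := by decide
  have e5 : PySem.Int.toChars 5 = ['5'] := by decide
  have e6 : PySem.Int.toChars 6 = ['6'] := by decide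
  have e7 : PySem.Int.toChars 7 = ['7'] := by decide
  have e8 : PySem.Int.toChars 8 = ['8'] := by decide
  have e9 : PySem.Int.toChars 9 = ['9'] := by decide
  simp [PySem.List.enumerate_cons, PySem.List.enumerate_nil, pvDigits,
    e0, e1, e2, e3, e4, e5, e6, e7, e8, e9]

theorem pvAttach_flatMap {α β : Type} (l : List α) (f : α → List β) :
    l.attach.flatMap (fun i => f i.1) = l.flatMap f := by
  simp only [List.flatMap_subtype, List.unattach_attach]

theorem pvCore_eq_gen : ∀ n (cs : List Char), cs.count 'X' = n → 'X' ∈ cs →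
    substituirCPFCore cs = pvGen cs := by
  intro n
  induction n using Nat.strong_induction_on with
  | _ n ih =>
    intro cs hn hX
    have hfind : PySem.Chars.find cs ['X'] ≠ -1 := by
      rw [Ne, PySem.Chars.find_eq_neg_one_iff, List.singleton_infix_iff]
      simp [hX]
    rw [substituirCPFCore, if_pos hfind]
    simp only []
    rw [pvAttach_flatMap
      (l := (PySem.List.enumerate ((PySem.List.pyRange 0 10 1).map (fun _ => cs))).map
        (fun p => pvReplaceFirstX p.2 (PySem.Int.toChars p.1)))
      (f := fun x => if PySem.Chars.find x ['X'] > -1 then substituirCPFCore x else [])]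
    rw [pvTemp_eq]
    have hdig : ∀ d ∈ pvDigits, d ≠ 'X' := by simp [pvDigits]
    have htempcount : ∀ d ∈ pvDigits,
        (pvReplaceFirstX cs [d]).count 'X' + 1 = cs.count 'X' := by
      intro d hd
      refine pvReplaceFirstX_count cs [d] hX ?_
      simp only [List.mem_singleton]
      exact fun h => hdig d hd h.symm
    by_cases hone : cs.count 'X' = 1
    · -- exactly one "X": the ten replacements are complete, nothing recurses, the filter keeps all
      have hnoX : ∀ d ∈ pvDigits, 'X' ∉ pvReplaceFirstX cs [d] := by
        intro d hd
        have := htempcount d hd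
        rw [hone] at this
        exact List.count_eq_zero.mp (by omega)
      have happ : ((pvDigits.map (fun d => pvReplaceFirstX cs [d])).flatMap
          (fun i => if PySem.Chars.find i ['X'] > -1 then substituirCPFCore i else []))
          = [] := by
        refine List.flatMap_eq_nil_iff.mpr (fun i hi => ?_)
        obtain ⟨d, hd, hrep⟩ := List.mem_map.mp hi
        rw [if_neg ?_]
        rw [not_lt, ← hrep]
        have : PySem.Chars.find (pvReplaceFirstX cs [d]) ['X'] = -1 := by
          rw [PySem.Chars.find_eq_neg_one_iff, List.singleton_infix_iff]
          exact hnoX d hd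
        omega
      rw [happ, List.append_nil]
      rw [pvGen_step cs hX]
      rw [List.filter_eq_self.mpr ?keep]
      · rw [List.flatMap_congr (fun d hd => pvGen_no_X _ (hnoX d hd))]
        exact List.map_eq_flatMap
      case keep =>
        intro u hu
        obtain ⟨d, hd, hrep⟩ := List.mem_map.mp hu
        rw [← hrep]
        simp only [beq_iff_eq]
        rw [PySem.Chars.find_eq_neg_one_iff, List.singleton_infix_iff]
        exact hnoX d hd
    · -- two or more "X": every replacement still has an "X", the filter drops all ten and keeps
      -- exactly the recursive expansions, in order
      have hhasX : ∀ d ∈ pvDigits, 'X' ∈ pvReplaceFirstX cs [d] := by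
        intro d hd
        have h1 := htempcount d hd
        have h2 : cs.count 'X' ≠ 0 := by
          simp only [ne_eq, List.count_eq_zero]
          exact fun h => h hX
        exact List.count_pos_iff.mp (by omega)
      rw [List.filter_append]
      have hdrop : ((pvDigits.map (fun d => pvReplaceFirstX cs [d])).filter
          (fun i => PySem.Chars.find i ['X'] == -1)) = [] := by
        refine List.filter_eq_nil_iff.mpr (fun u hu => ?_)
        obtain ⟨d, hd, hrep⟩ := List.mem_map.mp hu
        simp only [beq_iff_eq, ← hrep]
        rw [PySem.Chars.find_eq_neg_one_iff, List.singleton_infix_iff]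
        simp [hhasX d hd]
      rw [hdrop, List.nil_append]
      have happ : ((pvDigits.map (fun d => pvReplaceFirstX cs [d])).flatMap
          (fun i => if PySem.Chars.find i ['X'] > -1 then substituirCPFCore i else []))
          = pvDigits.flatMap (fun d => pvGen (pvReplaceFirstX cs [d])) := by
        rw [List.flatMap_map]
        refine List.flatMap_congr (fun d hd => ?_)
        have hf : PySem.Chars.find (pvReplaceFirstX cs [d]) ['X'] > -1 := by
          have h1 : PySem.Chars.find (pvReplaceFirstX cs [d]) ['X'] ≠ -1 := by
            rw [Ne, PySem.Chars.find_eq_neg_one_iff, List.singleton_infix_iff]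
            simp [hhasX d hd]
          have h2 := PySem.Chars.neg_one_le_find (s := pvReplaceFirstX cs [d]) (sub := ['X'])
          omega
        rw [if_pos hf]
        exact ih ((pvReplaceFirstX cs [d]).count 'X')
          (by have := htempcount d hd; omega) _ rfl (hhasX d hd)
      rw [happ]
      rw [List.filter_eq_self.mpr ?keepall]
      · exact (pvGen_step cs hX).symm
      case keepall =>
        intro u hu
        obtain ⟨d, hd, hv⟩ := List.mem_flatMap.mp hu
        simp only [beq_iff_eq]
        rw [PySem.Chars.find_eq_neg_one_iff, List.singleton_infix_iff]
        exact pvGen_mem_no_X _ u hv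

theorem substituirCPF_equal (cpf : String) (hpre : PySem.Str.isIn "X" cpf = true) :
    substituirCPF cpf = substituirCPF_alt cpf := by
  have hX : 'X' ∈ cpf.toList := by
    have := (PySem.Str.isIn_iff_infix (sub := "X") (s := cpf)).mp hpre
    exact (List.singleton_infix_iff _ _).mp this
  have hds : "0123456789".toList = pvDigits := by decide
  rw [substituirCPF_alt, if_pos hpre, hds]
  rw [pvFold_eq]
  rw [substituirCPF, pvCore_eq_gen (cpf.toList.count 'X') cpf.toList rfl hX]
  simp

-- ===== VERDICT (by name: the statement is the Claim_ definition above) =====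
theorem substituirCPF_spec : Claim_equal_substituirCPF := by
  intro cpf _ hpre
  exact substituirCPF_equal cpf hpre
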